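-- pv_equiv track=rewrite | github.com/vladis62/only-algo |  yandex/sprint_8/find_pattern.py | find_pattern
-- ===== SOURCE A (Python) =====
-- def find_pattern(measurements, pattern):
--     indexes = []
--     for i in range(len(pattern) - 1, len(measurements)):
--         offset: int = i - (len(pattern) - 1)
--         measurements_slice = measurements[offset : i + 1]
--         diff = set((x - y for x, y in zip(measurements_slice, pattern)))
--         if len(diff) == 1:
--             indexes.append(offset + 1)
--     return indexes
-- ===== SOURCE B (Python) =====
-- def find_pattern(measurements, pattern):
--     # A window matches up to a constant additive
--     # offset iff its consecutive-difference array equals the pattern's.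
--     if not pattern:
--         return []
--     dm = [b - a for a, b in zip(measurements, measurements[1:])]
--     dp = [b - a for a, b in zip(pattern, pattern[1:])]
--     k = len(dp)
--     return [o + 1 for o in range(len(measurements) - len(pattern) + 1)
--             if dm[o:o + k] == dp]
-- ===== Notes on version B (the rewrite author's own statement) =====
-- stated objective: alternative
-- what changed: Instead of building a set of elementwise window-minus-pattern differences for every window and testing its cardinality, B precomputes the consecutive-difference arrays of both sequences once and reports a window when the corresponding slice of the measurement-difference array equals the pattern-difference array.
import Mathlib
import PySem

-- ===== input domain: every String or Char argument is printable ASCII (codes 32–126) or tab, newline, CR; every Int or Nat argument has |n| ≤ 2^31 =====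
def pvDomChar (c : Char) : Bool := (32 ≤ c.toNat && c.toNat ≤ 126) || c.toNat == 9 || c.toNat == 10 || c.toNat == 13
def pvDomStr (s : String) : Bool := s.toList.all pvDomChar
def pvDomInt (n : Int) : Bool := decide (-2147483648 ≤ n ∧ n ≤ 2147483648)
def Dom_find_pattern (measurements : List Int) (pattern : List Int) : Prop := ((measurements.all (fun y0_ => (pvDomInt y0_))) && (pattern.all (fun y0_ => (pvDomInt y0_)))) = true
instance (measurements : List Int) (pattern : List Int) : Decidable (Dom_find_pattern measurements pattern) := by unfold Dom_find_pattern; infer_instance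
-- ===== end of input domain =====

-- B replaces A's per-window set of pairwise differences by precomputed
-- consecutive-difference arrays compared slice-wise (alternative characterisation).

-- ===== PORT A =====
def find_pattern (measurements : List Int) (pattern : List Int) : List Int :=
  (PySem.List.pyRange ((pattern.length : Int) - 1) (measurements.length : Int) 1).foldl
    (fun indexes i =>
      let offset : Int := i - ((pattern.length : Int) - 1)
      let measurements_slice := PySem.List.slice measurements (some offset) (some (i + 1))
      let diff : PySem.Set Int :=
        PySem.Set.ofList ((measurements_slice.zip pattern).map (fun xy => xy.1 - xy.2))
      if PySem.Set.len diff == 1 then indexes ++ [offset + 1] else indexes)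
    []

-- ===== PORT B =====
def find_pattern_alt (measurements : List Int) (pattern : List Int) : List Int :=
  if pattern = [] then []
  else
    let dm := (measurements.zip (PySem.List.slice measurements (some 1) none)).map
      (fun ab => ab.2 - ab.1)
    let dp := (pattern.zip (PySem.List.slice pattern (some 1) none)).map
      (fun ab => ab.2 - ab.1)
    let k : Int := (dp.length : Int)
    (PySem.List.pyRange 0 ((measurements.length : Int) - (pattern.length : Int) + 1) 1).foldl
      (fun acc o =>
        if PySem.List.slice dm (some o) (some (o + k)) == dp then acc ++ [o + 1] else acc)
      []

-- ===== PRECONDITION & SPEC =====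
def Spec_find_pattern (measurements : List Int) (pattern : List Int) (out : List Int) : Prop := out = find_pattern_alt measurements pattern
instance (measurements : List Int) (pattern : List Int) (out : List Int) : Decidable (Spec_find_pattern measurements pattern out) := by unfold Spec_find_pattern; infer_instance

-- ===== CLAIM (what is proved, stated in full; the proofs are below) =====
def Claim_equal_find_pattern : Prop := ∀ (measurements : List Int) (pattern : List Int), Dom_find_pattern measurements pattern → Spec_find_pattern measurements pattern (find_pattern measurements pattern)

-- ===== LEMMAS AND PROOFS =====

-- consecutive differences, recursive form convenient for induction
def pvDiffs : List Int → List Int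
  | a :: b :: t => (b - a) :: pvDiffs (b :: t)
  | [] => []
  | [_] => []

lemma pvDiffs_eq (l : List Int) :
    (l.zip l.tail).map (fun ab => ab.2 - ab.1) = pvDiffs l := by
  match l with
  | [] => rfl
  | [_] => rfl
  | a :: b :: t => simpa [pvDiffs] using pvDiffs_eq (b :: t)

lemma pvDiffs_length (l : List Int) : (pvDiffs l).length = l.length - 1 := by
  match l with
  | [] => rfl
  | [_] => rfl
  | a :: b :: t => simpa [pvDiffs] using pvDiffs_length (b :: t)

lemma pvDiffs_take (l : List Int) (m : Nat) :
    pvDiffs (l.take m) = (pvDiffs l).take (m - 1) := by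
  match l, m with
  | [], _ => simp [pvDiffs]
  | _, 0 => simp [pvDiffs]
  | [_], m' + 1 => cases m' <;> simp [pvDiffs]
  | a :: b :: t, 1 => simp [pvDiffs]
  | a :: b :: t, (m' + 2) =>
      simpa [pvDiffs] using pvDiffs_take (b :: t) (m' + 1)

lemma pvDiffs_drop (l : List Int) (o : Nat) :
    pvDiffs (l.drop o) = (pvDiffs l).drop o := by
  match l, o with
  | _, 0 => simp
  | [], _ => simp [pvDiffs]
  | [_], o' + 1 => cases o' <;> simp [pvDiffs]
  | a :: b :: t, (o' + 1) =>
      simpa [pvDiffs] using pvDiffs_drop (b :: t) o'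

lemma pvLen_le_foldl_add (zs : List Int) (s : PySem.Set Int) :
    s.length ≤ (List.foldl PySem.Set.add s zs).length := by
  induction zs generalizing s with
  | nil => simp
  | cons x t ih =>
      refine le_trans ?_ (ih (PySem.Set.add s x))
      by_cases h : x ∈ s <;> simp [PySem.Set.add, PySem.Set.contains, h]

lemma pvFoldl_add_len_one (zs : List Int) (z : Int) :
    (List.foldl PySem.Set.add [z] zs).length = 1 ↔ ∀ x ∈ zs, x = z := by
  induction zs with
  | nil => simp
  | cons x t ih =>
      by_cases h : x = z
      · subst h
        have hadd : PySem.Set.add [x] x = [x] := by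
          simp [PySem.Set.add, PySem.Set.contains]
        simp only [List.foldl_cons, hadd]
        simpa using ih
      · have hadd : PySem.Set.add [z] x = [z, x] := by
          simp [PySem.Set.add, PySem.Set.contains]
          tauto
        simp only [List.foldl_cons, hadd]
        constructor
        · intro hlen
          exfalso
          have hm := pvLen_le_foldl_add t [z, x]
          simp only [List.length_cons, List.length_nil] at hm
          omega
        · intro hall
          exact absurd (hall x (by simp)) h

lemma pvWindow_key (w p : List Int) (a b : Int) (hlen : w.length = p.length) :
    (∀ x ∈ (w.zip p).map (fun xy => xy.1 - xy.2), x = a - b) ↔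
      pvDiffs (a :: w) = pvDiffs (b :: p) := by
  induction w generalizing p a b with
  | nil =>
      cases p with
      | nil => simp [pvDiffs]
      | cons b2 p' => simp at hlen
  | cons a2 w' ih =>
      cases p with
      | nil => simp at hlen
      | cons b2 p' =>
          have hlen' : w'.length = p'.length := by simpa using hlen
          have hih := ih p' a2 b2 hlen'
          simp only [List.zip_cons_cons, List.map_cons, List.mem_cons, pvDiffs,
            List.cons.injEq, forall_eq_or_imp] at *
          constructor
          · rintro ⟨h1, h2⟩
            refine ⟨by omega, hih.mp ?_⟩
            intro x hx
            have := h2 x hx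
            omega
          · rintro ⟨h1, h2⟩
            refine ⟨by omega, ?_⟩
            intro x hx
            have := hih.mpr h2 x hx
            omega

-- ===== VERDICT (by name: the statement is the Claim_ definition above) =====
theorem find_pattern_spec : Claim_equal_find_pattern := by
  intro measurements pattern _
  unfold Spec_find_pattern find_pattern find_pattern_alt
  cases pattern with
  | nil =>
      rw [PySem.List.foldl_congr_mem (g := fun (acc : List Int) (_ : Int) => acc)]
      · simp
      · intro acc x hx
        simp [PySem.Set.ofList, PySem.Set.len]
  | cons b p =>
      have hne : (b :: p) ≠ ([] : List Int) := by simp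
      rw [if_neg hne]
      simp only [PySem.List.slice_from_one, pvDiffs_eq, List.length_cons,
        PySem.List.pyRange_one]
      have h1 : ((measurements.length : Int) - ((p.length + 1 : Nat) - 1) : Int)
          = (measurements.length : Int) - (p.length : Int) := by push_cast; ring
      have h2 : ((measurements.length : Int) - ((p.length + 1 : Nat) : Int) + 1 - 0 : Int)
          = (measurements.length : Int) - (p.length : Int) := by push_cast; ring
      rw [h1, h2, List.foldl_map, List.foldl_map]
      apply PySem.List.foldl_congr_mem
      intro acc k hk
      simp only [List.mem_range] at hk
      have hkm : k + (p.length + 1) ≤ measurements.length := by omega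
      have e1 : ((p.length + 1 : Nat) - 1 + (k : Int) - ((p.length + 1 : Nat) - 1) : Int)
          = (k : Int) := by ring
      have e2 : ((p.length + 1 : Nat) - 1 + (k : Int) + 1 : Int)
          = (k : Int) + ((p.length + 1 : Nat) : Int) := by push_cast; ring
      have e3 : ((0 : Int) + (k : Int)) = (k : Int) := by ring
      rw [e1, e2, e3, PySem.List.slice_natCast_add, PySem.List.slice_natCast_add]
      have hwl : ((measurements.drop k).take (p.length + 1)).length = p.length + 1 := by
        simp [List.length_take, List.length_drop]; omega
      rcases hw : (measurements.drop k).take (p.length + 1) with _ | ⟨a, w⟩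
      · rw [hw] at hwl; simp at hwl
      · rw [hw] at hwl
        have hwl' : w.length = p.length := by simpa using hwl
        have hcond : ((PySem.Set.ofList
              (List.map (fun xy => xy.1 - xy.2) ((a :: w).zip (b :: p)))).len == 1)
            = (((pvDiffs measurements).drop k).take (pvDiffs (b :: p)).length
                == pvDiffs (b :: p)) := by
          rw [Bool.eq_iff_iff]
          simp only [beq_iff_eq, List.zip_cons_cons, List.map_cons]
          have hof : PySem.Set.ofList ((a - b) :: List.map (fun xy => xy.1 - xy.2) (w.zip p))
              = List.foldl PySem.Set.add [a - b] (List.map (fun xy => xy.1 - xy.2) (w.zip p)) := by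
            simp [PySem.Set.ofList, PySem.Set.add, PySem.Set.contains]
          rw [hof]
          have hdl : (pvDiffs (b :: p)).length = p.length := by
            simpa using pvDiffs_length (b :: p)
          have hdw : ((pvDiffs measurements).drop k).take p.length = pvDiffs (a :: w) := by
            rw [← hw, pvDiffs_take, pvDiffs_drop]
            norm_num
          rw [hdl, hdw, PySem.Set.len, Nat.cast_eq_one]
          exact (pvFoldl_add_len_one _ _).trans (pvWindow_key w p a b hwl')
        rw [hcond]
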